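-- pv_equiv track=rewrite | github.com/CrystalPeakSecurity/jcc | src/jcc/ir/utils.py | llvm_type_byte_size
-- ===== SOURCE A (Python) =====
-- def llvm_type_byte_size(type_str: str) -> int | None:
--     """Get size in bytes for an LLVM type string.
--
--     Handles scalar types (i8, i16, i32, i64, ptr) and arrays like [N x T].
--     Returns None for types we can't size (structs, opaque types).
--     """
--     type_str = type_str.strip()
--
--     # Scalar types
--     if type_str in ("i1", "i8"):
--         return 1
--     if type_str == "i16":
--         return 2
--     if type_str == "i32":
--         return 4
--     if type_str == "i64":
--         return 8
--     if type_str == "ptr":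
--         return 4  # wasm32 pointer size
--
--     # Array [N x T] - recursively compute
--     if type_str.startswith("["):
--         x_pos = type_str.find(" x ")
--         if x_pos != -1:
--             count_str = type_str[1:x_pos]
--             # Handle nested arrays: strip one layer of brackets
--             elem_type = type_str[x_pos + 3 :].rstrip("]").strip()
--             try:
--                 count = int(count_str)
--                 elem_size = llvm_type_byte_size(elem_type)
--                 if elem_size is not None:
--                     return count * elem_size
--             except ValueError:
--                 pass
--
--     return None
-- ===== SOURCE B (Python) =====
-- _SCALAR_SIZES = {"i1": 1, "i8": 1, "i16": 2, "i32": 4, "i64": 8, "ptr": 4}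
--
--
-- def llvm_type_byte_size(type_str: str) -> int | None:
--     """Iterative version: peel array layers while accumulating a size multiplier,
--     then look the remaining scalar up in a table."""
--     type_str = type_str.strip()
--     multiplier = 1
--     while type_str.startswith("[") and " x " in type_str:
--         x_pos = type_str.find(" x ")
--         try:
--             multiplier *= int(type_str[1:x_pos])
--         except ValueError:
--             return None
--         type_str = type_str[x_pos + 3:].rstrip("]").strip()
--     scalar = _SCALAR_SIZES.get(type_str)
--     if scalar is None:
--         return None
--     return multiplier * scalar
-- ===== Notes on version B (the rewrite author's own statement) =====
-- stated objective: alternative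
-- what changed: Replaces A's recursion over array nesting by a single iterative loop that peels one array layer per step while accumulating a size multiplier, with the scalar sizes moved from an if-chain into a lookup table.
import Mathlib
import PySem

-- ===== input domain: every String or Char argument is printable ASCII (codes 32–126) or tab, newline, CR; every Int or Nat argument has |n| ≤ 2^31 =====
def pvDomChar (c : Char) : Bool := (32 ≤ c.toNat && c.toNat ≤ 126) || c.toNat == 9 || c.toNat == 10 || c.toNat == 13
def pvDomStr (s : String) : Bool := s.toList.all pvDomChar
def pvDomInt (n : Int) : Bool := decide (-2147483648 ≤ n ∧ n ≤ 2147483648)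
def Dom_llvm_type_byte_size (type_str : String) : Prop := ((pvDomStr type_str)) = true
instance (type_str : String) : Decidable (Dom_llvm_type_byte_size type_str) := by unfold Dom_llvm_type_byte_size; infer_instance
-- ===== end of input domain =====

-- B replaces A's recursion over array nesting by one loop that accumulates a size
-- multiplier and a scalar lookup table (objective: alternative decomposition, same cost).

-- s.rstrip(']') : drop all trailing ']' characters (exact: PySem has no chars-rstrip)
def pvRstripBr (s : List Char) : List Char :=
  (s.reverse.dropWhile (fun c => c == ']')).reverse


-- length facts used only by the ports' termination proofs
theorem pv_len_strip_le (s : List Char) :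
    (PySem.Chars.strip s).length ≤ s.length := by
  simp only [PySem.Chars.strip, PySem.Chars.rstrip, PySem.Chars.lstrip, List.length_reverse]
  exact le_trans (List.length_dropWhile_le _ _)
    (by simpa using List.length_dropWhile_le PySem.Chars.isspace s)

theorem pv_len_rstripBr_le (s : List Char) : (pvRstripBr s).length ≤ s.length := by
  simp only [pvRstripBr, List.length_reverse]
  simpa using List.length_dropWhile_le (fun c => c == ']') s.reverse

theorem pv_slice_lt (t : List Char) (hb : PySem.Chars.startswith t "[".toList = true) (x : Int)
    (hx : -1 ≤ x) :
    (PySem.Chars.slice t (some (x + 3)) none).length < t.length := by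
  have hne : t ≠ [] := by
    intro h
    rw [h] at hb
    exact absurd ((PySem.Chars.startswith_iff _ _).mp hb) (by simp)
  have hl : 0 < t.length := List.length_pos_iff.mpr hne
  rw [PySem.Chars.slice_eq_listSlice, PySem.List.slice_from t (by omega : (0:Int) ≤ x + 3)]
  have : 1 ≤ (x + 3).toNat := by omega
  simp only [List.length_drop]
  omega

theorem pv_step_lt (t : List Char) (hb : PySem.Chars.startswith t "[".toList = true) (x : Int)
    (hx : -1 ≤ x) :
    (PySem.Chars.strip (pvRstripBr (PySem.Chars.slice t (some (x + 3)) none))).length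
      < t.length :=
  lt_of_le_of_lt (le_trans (pv_len_strip_le _) (pv_len_rstripBr_le _)) (pv_slice_lt t hb x hx)

-- ===== PORT A =====
def pvA (s : List Char) : Option Int :=
  let t := PySem.Chars.strip s
  if t = "i1".toList ∨ t = "i8".toList then some 1
  else if t = "i16".toList then some 2
  else if t = "i32".toList then some 4
  else if t = "i64".toList then some 8
  else if t = "ptr".toList then some 4
  else if hb : PySem.Chars.startswith t "[".toList then
    let x := PySem.Chars.find t " x ".toList
    if hx : x ≠ -1 then
      let countStr := PySem.Chars.slice t (some 1) (some x)
      let elemType := PySem.Chars.strip (pvRstripBr (PySem.Chars.slice t (some (x + 3)) none))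
      match PySem.Int.ofChars? countStr with
      | none => none
      | some count =>
          match pvA elemType with
          | some elemSize => some (count * elemSize)
          | none => none
    else none
  else none
termination_by s.length
decreasing_by
  exact lt_of_lt_of_le
    (pv_step_lt _ hb _ (PySem.Chars.neg_one_le_find _ _)) (pv_len_strip_le s)

def llvm_type_byte_size (type_str : String) : Option Int :=
  pvA type_str.toList

-- ===== PORT B =====
def pvScalars : PySem.Dict (List Char) Int :=
  PySem.Dict.ofList [("i1".toList, 1), ("i8".toList, 1), ("i16".toList, 2),
                     ("i32".toList, 4), ("i64".toList, 8), ("ptr".toList, 4)]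

def pvBLoop (m : Int) (t : List Char) : Option Int :=
  if hb : PySem.Chars.startswith t "[".toList ∧ PySem.Chars.isIn " x ".toList t then
    let x := PySem.Chars.find t " x ".toList
    match PySem.Int.ofChars? (PySem.Chars.slice t (some 1) (some x)) with
    | none => none
    | some c =>
        pvBLoop (m * c) (PySem.Chars.strip (pvRstripBr (PySem.Chars.slice t (some (x + 3)) none)))
  else
    match PySem.Dict.get? pvScalars t with
    | none => none
    | some sz => some (m * sz)
termination_by t.length
decreasing_by
  exact pv_step_lt _ hb.1 _ (PySem.Chars.neg_one_le_find _ _)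

def llvm_type_byte_size_alt (type_str : String) : Option Int :=
  pvBLoop 1 (PySem.Chars.strip type_str.toList)

-- ===== PRECONDITION & SPEC =====
def Spec_llvm_type_byte_size (type_str : String) (out : Option Int) : Prop := out = llvm_type_byte_size_alt type_str
instance (type_str : String) (out : Option Int) : Decidable (Spec_llvm_type_byte_size type_str out) := by unfold Spec_llvm_type_byte_size; infer_instance

-- ===== CLAIM (what is proved, stated in full; the proofs are below) =====
def Claim_equal_llvm_type_byte_size : Prop := ∀ (type_str : String), Dom_llvm_type_byte_size type_str → Spec_llvm_type_byte_size type_str (llvm_type_byte_size type_str)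

-- ===== LEMMAS AND PROOFS =====

theorem pv_dw_dw {α : Type} (p : α → Bool) (l : List α) :
    List.dropWhile p (List.dropWhile p l) = List.dropWhile p l := by
  cases h : List.dropWhile p l with
  | nil => simp
  | cons a as =>
    have ha := List.head_dropWhile_not p (l := l) (by simp [h])
    simp only [h, List.head_cons] at ha
    simp [ha]

theorem pv_strip_idem (s : List Char) :
    PySem.Chars.strip (PySem.Chars.strip s) = PySem.Chars.strip s := by
  simp only [PySem.Chars.strip, PySem.Chars.rstrip, PySem.Chars.lstrip]
  set p := PySem.Chars.isspace with hp
  set v := List.dropWhile p s with hv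
  set u := (List.dropWhile p v.reverse).reverse with hu
  have hdu : List.dropWhile p u = u := by
    cases h : u with
    | nil => simp
    | cons a as =>
      have hpre : u <+: v := by
        rw [← List.reverse_suffix, hu, List.reverse_reverse]
        exact List.dropWhile_suffix p
      obtain ⟨r, hr⟩ := hpre
      have hv_ne : v ≠ [] := by
        intro hvnil
        rw [hvnil] at hr
        simp [h] at hr
      have hhead : p (v.head hv_ne) = false := by
        have := List.head_dropWhile_not p (l := s) (w := by rwa [← hv])
        simpa [← hv] using this
      have hav : v.head hv_ne = a := by
        have h9 : v.head? = some a := by rw [← hr, h]; simp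
        have h8 : v.head? = some (v.head hv_ne) := List.head?_eq_some_head hv_ne
        rw [h9] at h8
        exact (Option.some.inj h8).symm
      have hpa : p a = false := by rw [← hav]; exact hhead
      simp [hpa]
  rw [hdu, hu, List.reverse_reverse, pv_dw_dw, ← hu]

theorem pvA_strip (s : List Char) : pvA (PySem.Chars.strip s) = pvA s := by
  rw [pvA.eq_def, pvA.eq_def, pv_strip_idem]

theorem pv_get_none (u : List Char) (h1 : u ≠ "i1".toList) (h2 : u ≠ "i8".toList)
    (h3 : u ≠ "i16".toList) (h4 : u ≠ "i32".toList) (h5 : u ≠ "i64".toList)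
    (h6 : u ≠ "ptr".toList) : PySem.Dict.get? pvScalars u = none := by
  simp [pvScalars, PySem.Dict.get?, PySem.Dict.ofList]
  intro a b h
  fin_cases h <;> simp_all <;> exact fun hh => absurd hh.symm (by assumption)

theorem pv_loop_eq : ∀ (n : Nat) (t : List Char), t.length ≤ n → ∀ (m : Int),
    pvBLoop m (PySem.Chars.strip t) = (pvA t).map (fun v => m * v) := by
  intro n
  induction n with
  | zero =>
    intro t ht m
    have h0 : t = [] := List.eq_nil_of_length_eq_zero (Nat.le_zero.mp ht)
    subst h0
    have hs : PySem.Chars.strip ([] : List Char) = [] := rfl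
    have ha : pvA [] = none := by rw [pvA.eq_def]; decide
    rw [hs, ha, pvBLoop.eq_def]
    have hc : ¬ (PySem.Chars.startswith [] "[".toList = true ∧
        PySem.Chars.isIn " x ".toList [] = true) := by decide
    rw [dif_neg hc]
    have hg : PySem.Dict.get? pvScalars ([] : List Char) = none := by decide
    rw [hg]
    simp
  | succ n ih =>
    intro t ht m
    rw [pvA.eq_def, pvBLoop.eq_def]
    dsimp only
    set u := PySem.Chars.strip t with hu
    by_cases h1 : u = "i1".toList ∨ u = "i8".toList
    · rw [if_pos h1]
      have hc : ¬ (PySem.Chars.startswith u "[".toList = true ∧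
          PySem.Chars.isIn " x ".toList u = true) := by
        rcases h1 with h | h <;> rw [h] <;> decide
      rw [dif_neg hc]
      have hg : PySem.Dict.get? pvScalars u = some 1 := by
        rcases h1 with h | h <;> rw [h] <;> decide
      rw [hg]
      simp
    · rw [if_neg h1]
      by_cases h2 : u = "i16".toList
      · rw [if_pos h2]
        have hc : ¬ (PySem.Chars.startswith u "[".toList = true ∧
            PySem.Chars.isIn " x ".toList u = true) := by rw [h2]; decide
        rw [dif_neg hc]
        have hg : PySem.Dict.get? pvScalars u = some 2 := by rw [h2]; decide
        rw [hg]
        simp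
      · rw [if_neg h2]
        by_cases h3 : u = "i32".toList
        · rw [if_pos h3]
          have hc : ¬ (PySem.Chars.startswith u "[".toList = true ∧
              PySem.Chars.isIn " x ".toList u = true) := by rw [h3]; decide
          rw [dif_neg hc]
          have hg : PySem.Dict.get? pvScalars u = some 4 := by rw [h3]; decide
          rw [hg]
          simp
        · rw [if_neg h3]
          by_cases h4 : u = "i64".toList
          · rw [if_pos h4]
            have hc : ¬ (PySem.Chars.startswith u "[".toList = true ∧
                PySem.Chars.isIn " x ".toList u = true) := by rw [h4]; decide
            rw [dif_neg hc]
            have hg : PySem.Dict.get? pvScalars u = some 8 := by rw [h4]; decide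
            rw [hg]
            simp
          · rw [if_neg h4]
            by_cases h5 : u = "ptr".toList
            · rw [if_pos h5]
              have hc : ¬ (PySem.Chars.startswith u "[".toList = true ∧
                  PySem.Chars.isIn " x ".toList u = true) := by rw [h5]; decide
              rw [dif_neg hc]
              have hg : PySem.Dict.get? pvScalars u = some 4 := by rw [h5]; decide
              rw [hg]
              simp
            · rw [if_neg h5]
              have hgn : PySem.Dict.get? pvScalars u = none :=
                pv_get_none u (fun h => h1 (Or.inl h)) (fun h => h1 (Or.inr h)) h2 h3 h4 h5
              by_cases hb : PySem.Chars.startswith u "[".toList = true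
              · rw [dif_pos hb]
                by_cases hx : PySem.Chars.find u " x ".toList ≠ -1
                · rw [dif_pos hx]
                  have hc : PySem.Chars.startswith u "[".toList = true ∧
                      PySem.Chars.isIn " x ".toList u = true :=
                    ⟨hb, (PySem.Chars.isIn_iff_infix _ _).mpr
                      ((PySem.Chars.find_ne_neg_one_iff _ _).mp hx)⟩
                  rw [dif_pos hc]
                  cases hp : PySem.Int.ofChars?
                      (PySem.Chars.slice u (some 1) (some (PySem.Chars.find u " x ".toList))) with
                  | none => simp
                  | some c =>
                    dsimp only
                    have hlen : (pvRstripBr (PySem.Chars.slice u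
                        (some (PySem.Chars.find u " x ".toList + 3)) none)).length ≤ n := by
                      have hs := pv_slice_lt u hb _ (PySem.Chars.neg_one_le_find u " x ".toList)
                      have hr := pv_len_rstripBr_le (PySem.Chars.slice u
                        (some (PySem.Chars.find u " x ".toList + 3)) none)
                      have ht' : u.length ≤ t.length := pv_len_strip_le t
                      omega
                    rw [ih _ hlen (m * c), pvA_strip]
                    cases pvA (pvRstripBr (PySem.Chars.slice u
                        (some (PySem.Chars.find u " x ".toList + 3)) none)) with
                    | none => simp
                    | some es => simp [mul_assoc]
                · rw [dif_neg hx]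
                  have hc : ¬ (PySem.Chars.startswith u "[".toList = true ∧
                      PySem.Chars.isIn " x ".toList u = true) := by
                    intro hc
                    exact hx (by
                      rw [Ne, PySem.Chars.find_eq_neg_one_iff]
                      exact not_not_intro ((PySem.Chars.isIn_iff_infix _ _).mp hc.2))
                  rw [dif_neg hc, hgn]
                  simp
              · rw [dif_neg hb]
                have hc : ¬ (PySem.Chars.startswith u "[".toList = true ∧
                    PySem.Chars.isIn " x ".toList u = true) := fun hc => hb hc.1
                rw [dif_neg hc, hgn]
                simp

-- ===== VERDICT (by name: the statement is the Claim_ definition above) =====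
theorem llvm_type_byte_size_spec : Claim_equal_llvm_type_byte_size := by
  intro ts _
  unfold Spec_llvm_type_byte_size llvm_type_byte_size llvm_type_byte_size_alt
  rw [pv_loop_eq ts.toList.length ts.toList le_rfl 1]
  cases pvA ts.toList <;> simp
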